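-- pv_equiv track=rewrite | github.com/Nkhan63957/Poker-Assistant-Model | poker_optimization_model_app.py | calculate_positions
-- ===== SOURCE A (Python) =====
-- def calculate_positions(dealer_idx, total_players):
--     positions = []
--     for i in range(total_players):
--         rel_pos = (i - dealer_idx) % total_players
--         if total_players == 2:
--             pos = 'Small Blind' if rel_pos == 1 else 'Big Blind/Button'
--         elif total_players == 3:
--             pos = 'Small Blind' if rel_pos == 1 else 'Big Blind' if rel_pos == 2 else 'Button'
--         elif total_players == 4:
--             pos = 'Small Blind' if rel_pos == 1 else 'Big Blind' if rel_pos == 2 else 'UTG' if rel_pos == 3 else 'Button'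
--         elif total_players == 5:
--             pos = 'Small Blind' if rel_pos == 1 else 'Big Blind' if rel_pos == 2 else 'UTG' if rel_pos == 3 else 'Cutoff' if rel_pos == 4 else 'Button'
--         else:
--             pos = 'Small Blind' if rel_pos == 1 else 'Big Blind' if rel_pos == 2 else 'UTG' if rel_pos == 3 else 'UTG+1' if rel_pos == 4 else 'Cutoff' if rel_pos == 5 else 'Button'
--         positions.append(pos)
--     return positions
-- ===== SOURCE B (Python) =====
-- def calculate_positions(dealer_idx, total_players):
--     n = total_players
--     if n <= 0:
--         return []
--     # Stage 1: labels by seat offset from the dealer (relative position 0 = dealer).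
--     if n == 2:
--         rel_labels = ['Big Blind/Button', 'Small Blind']
--     else:
--         ring = ['Button', 'Small Blind', 'Big Blind', 'UTG', 'UTG+1', 'Cutoff']
--         if n == 5:
--             ring.remove('UTG+1')
--         rel_labels = ring[:n] + ['Button'] * (n - len(ring))
--     # Stage 2: scatter each relative label into its absolute seat.
--     out = [''] * n
--     for r, label in enumerate(rel_labels):
--         out[(dealer_idx + r) % n] = label
--     return out
-- ===== Notes on version B (the rewrite author's own statement) =====
-- stated objective: alternative
-- what changed: Instead of looping over seats and deciding each label with nested ternary chains, B first builds the label sequence indexed by relative position (a ring list sliced and padded per player count) and then scatters each relative label into its absolute seat by index assignment (i.e. the inverse mapping), filling a preallocated output list.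
import Mathlib
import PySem

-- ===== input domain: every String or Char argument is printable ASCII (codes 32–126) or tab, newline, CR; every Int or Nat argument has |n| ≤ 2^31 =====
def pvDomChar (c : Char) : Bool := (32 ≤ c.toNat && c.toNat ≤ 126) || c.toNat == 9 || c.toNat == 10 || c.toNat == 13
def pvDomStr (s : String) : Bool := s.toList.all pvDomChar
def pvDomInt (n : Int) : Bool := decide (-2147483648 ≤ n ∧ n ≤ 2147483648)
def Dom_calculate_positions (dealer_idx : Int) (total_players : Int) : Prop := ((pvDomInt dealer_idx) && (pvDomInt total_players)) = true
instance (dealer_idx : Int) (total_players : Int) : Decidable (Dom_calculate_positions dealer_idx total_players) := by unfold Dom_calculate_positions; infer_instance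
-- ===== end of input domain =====

-- B replaces A's seat-by-seat loop of nested ternary chains by two staged passes: first build the
-- label sequence by RELATIVE position (a ring list sliced/padded per player count), then scatter
-- each relative label into its absolute seat by index assignment; objective: alternative.

-- ===== PORT A =====
def calculate_positions (dealer_idx : Int) (total_players : Int) : List String :=
  (PySem.List.pyRange 0 total_players 1).foldl (fun positions i =>
    let rel_pos := PySem.Int.mod (i - dealer_idx) total_players
    let pos :=
      if total_players == 2 then
        (if rel_pos == 1 then "Small Blind" else "Big Blind/Button")
      else if total_players == 3 then
        (if rel_pos == 1 then "Small Blind" else if rel_pos == 2 then "Big Blind" else "Button")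
      else if total_players == 4 then
        (if rel_pos == 1 then "Small Blind" else if rel_pos == 2 then "Big Blind"
         else if rel_pos == 3 then "UTG" else "Button")
      else if total_players == 5 then
        (if rel_pos == 1 then "Small Blind" else if rel_pos == 2 then "Big Blind"
         else if rel_pos == 3 then "UTG" else if rel_pos == 4 then "Cutoff" else "Button")
      else
        (if rel_pos == 1 then "Small Blind" else if rel_pos == 2 then "Big Blind"
         else if rel_pos == 3 then "UTG" else if rel_pos == 4 then "UTG+1"
         else if rel_pos == 5 then "Cutoff" else "Button")
    positions ++ [pos]) []

-- ===== PORT B =====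
def calculate_positions_alt (dealer_idx : Int) (total_players : Int) : List String :=
  let n := total_players
  if n ≤ 0 then []
  else
    let rel_labels :=
      if n == 2 then ["Big Blind/Button", "Small Blind"]
      else
        let ring : List String := ["Button", "Small Blind", "Big Blind", "UTG", "UTG+1", "Cutoff"]
        -- 'ring.remove("UTG+1")': the element is literally present, so Python never raises here
        let ring := if n == 5 then (PySem.List.remove? ring "UTG+1").getD ring else ring
        PySem.List.slice ring none (some n) ++ PySem.List.pyRepeat ["Button"] (n - (ring.length : Int))
    let out := PySem.List.pyRepeat [""] n
    (PySem.List.enumerate rel_labels 0).foldl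
      (fun o p => PySem.List.pySetD o (PySem.Int.mod (dealer_idx + p.1) n) p.2) out

-- ===== PRECONDITION & SPEC =====
def Spec_calculate_positions (dealer_idx : Int) (total_players : Int) (out : List String) : Prop := out = calculate_positions_alt dealer_idx total_players
instance (dealer_idx : Int) (total_players : Int) (out : List String) : Decidable (Spec_calculate_positions dealer_idx total_players out) := by unfold Spec_calculate_positions; infer_instance

-- ===== CLAIM =====
def Claim_equal_calculate_positions : Prop := ∀ (dealer_idx : Int) (total_players : Int), Dom_calculate_positions dealer_idx total_players → Spec_calculate_positions dealer_idx total_players (calculate_positions dealer_idx total_players)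

-- ===== LEMMAS AND PROOFS =====

-- A's per-seat label chain, as a named function of the player count and the relative position.
def labelFn (n rel_pos : Int) : String :=
  if n == 2 then
    (if rel_pos == 1 then "Small Blind" else "Big Blind/Button")
  else if n == 3 then
    (if rel_pos == 1 then "Small Blind" else if rel_pos == 2 then "Big Blind" else "Button")
  else if n == 4 then
    (if rel_pos == 1 then "Small Blind" else if rel_pos == 2 then "Big Blind"
     else if rel_pos == 3 then "UTG" else "Button")
  else if n == 5 then
    (if rel_pos == 1 then "Small Blind" else if rel_pos == 2 then "Big Blind"
     else if rel_pos == 3 then "UTG" else if rel_pos == 4 then "Cutoff" else "Button")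
  else
    (if rel_pos == 1 then "Small Blind" else if rel_pos == 2 then "Big Blind"
     else if rel_pos == 3 then "UTG" else if rel_pos == 4 then "UTG+1"
     else if rel_pos == 5 then "Cutoff" else "Button")

-- B's stage-1 list, standalone (definitionally the 'rel_labels' of the port).
def relLabels (n : Int) : List String :=
  if n == 2 then ["Big Blind/Button", "Small Blind"]
  else
    let ring : List String := ["Button", "Small Blind", "Big Blind", "UTG", "UTG+1", "Cutoff"]
    let ring := if n == 5 then (PySem.List.remove? ring "UTG+1").getD ring else ring
    PySem.List.slice ring none (some n) ++ PySem.List.pyRepeat ["Button"] (n - (ring.length : Int))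

theorem A_eq_map (d n : Int) :
    calculate_positions d n =
      (PySem.List.pyRange 0 n 1).map (fun i => labelFn n (PySem.Int.mod (i - d) n)) := by
  unfold calculate_positions
  rw [PySem.List.foldl_append_singleton_eq_map, List.nil_append]
  rfl

theorem relLabels_other {n : Int} (hn : 0 ≤ n) (h2 : n ≠ 2) (h5 : n ≠ 5) :
    relLabels n = (["Button", "Small Blind", "Big Blind", "UTG", "UTG+1", "Cutoff"] : List String).take n.toNat
      ++ List.replicate (n - 6).toNat "Button" := by
  simp only [relLabels, beq_iff_eq, if_neg h2, if_neg h5]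
  rw [PySem.List.pyRepeat_singleton, PySem.List.slice_to _ hn]
  rfl

theorem length_relLabels {n : Int} (hn : 0 < n) : (relLabels n).length = n.toNat := by
  by_cases h2 : n = 2
  · subst h2; decide
  by_cases h5 : n = 5
  · subst h5; decide
  rw [relLabels_other (by omega) h2 h5]
  simp [List.length_take, List.length_replicate]
  omega

theorem getElem?_relLabels {n : Int} (hn : 0 < n) (r : Nat) (hr : r < n.toNat) :
    (relLabels n)[r]? = some (labelFn n (r : Int)) := by
  by_cases h2 : n = 2
  · subst h2; have hr' : r < 2 := by omega
    interval_cases r <;> decide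
  by_cases h3 : n = 3
  · subst h3; have hr' : r < 3 := by omega
    interval_cases r <;> decide
  by_cases h4 : n = 4
  · subst h4; have hr' : r < 4 := by omega
    interval_cases r <;> decide
  by_cases h5 : n = 5
  · subst h5; have hr' : r < 5 := by omega
    interval_cases r <;> decide
  rw [relLabels_other (by omega) h2 h5]
  simp only [labelFn, beq_iff_eq, if_neg h2, if_neg h3, if_neg h4, if_neg h5]
  by_cases hr6 : r < 6
  · rw [List.getElem?_append_left (by simp [List.length_take]; omega)]
    rw [List.getElem?_take_of_lt hr]
    interval_cases r <;> simp
  · rw [List.getElem?_append_right (by simp [List.length_take]; omega)]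
    simp only [List.length_take]
    rw [List.getElem?_replicate]
    have e1 : ((r:Int) = 1) = False := by simp; omega
    have e2 : ((r:Int) = 2) = False := by simp; omega
    have e3 : ((r:Int) = 3) = False := by simp; omega
    have e4 : ((r:Int) = 4) = False := by simp; omega
    have e5 : ((r:Int) = 5) = False := by simp; omega
    simp [e1, e2, e3, e4, e5]
    omega

-- index correspondence for the scatter: i = (d+s) % n  ↔  (i-d) % n = s
theorem emod_shift {n d i s : Int} (hi : 0 ≤ i) (hi2 : i < n)
    (hs : 0 ≤ s) (hs2 : s < n) : i = (d + s) % n ↔ (i - d) % n = s := by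
  constructor
  · rintro rfl
    rw [Int.sub_emod, Int.emod_emod_of_dvd _ dvd_rfl, ← Int.sub_emod, add_sub_cancel_left,
      Int.emod_eq_of_lt hs hs2]
  · intro h
    rw [← h, Int.add_emod, Int.emod_emod_of_dvd _ dvd_rfl, ← Int.add_emod,
      add_sub_cancel, Int.emod_eq_of_lt hi hi2]

-- the scatter loop, characterised positionally
theorem scatter_getElem (d : Int) (n : Nat) (hn : 0 < n) :
    ∀ (L : List String) (s : Nat) (o : List String), o.length = n → s + L.length ≤ n →
      ∀ i : Nat, i < n →
      ((PySem.List.enumerate L (s : Int)).foldl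
          (fun o p => PySem.List.pySetD o (PySem.Int.mod (d + p.1) (n : Int)) p.2) o)[i]? =
        (if s ≤ (((i : Int) - d) % (n : Int)).toNat ∧ (((i : Int) - d) % (n : Int)).toNat < s + L.length
         then L[(((i : Int) - d) % (n : Int)).toNat - s]? else o[i]?) := by
  intro L
  induction L with
  | nil =>
    intro s o ho hlen i hi
    simp [PySem.List.enumerate]
  | cons l L ih =>
    intro s o ho hlen i hi
    rw [PySem.List.enumerate_cons]
    have hnpos : (0:Int) < (n:Int) := by exact_mod_cast hn
    have hk0 : (0:Int) ≤ (d + (s:Int)) % (n:Int) := Int.emod_nonneg _ (by omega)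
    have hklt : (d + (s:Int)) % (n:Int) < (n:Int) := Int.emod_lt_of_pos _ hnpos
    have hr0 : (0:Int) ≤ ((i:Int) - d) % (n:Int) := Int.emod_nonneg _ (by omega)
    have hrlt : ((i:Int) - d) % (n:Int) < (n:Int) := Int.emod_lt_of_pos _ hnpos
    set r : Nat := (((i : Int) - d) % (n : Int)).toNat with hrdef
    simp only [List.foldl_cons]
    have hstep : PySem.List.pySetD o (PySem.Int.mod (d + (s:Int)) (n:Int)) l
        = o.set ((d + (s:Int)) % (n:Int)).toNat l := by
      rw [PySem.Int.mod_eq_emod_of_pos hnpos, PySem.List.pySetD_of_nonneg _ _ hk0]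
    rw [hstep]
    have hcast : ((s:Int)) + 1 = (((s+1 : Nat)):Int) := by push_cast; ring
    have hLlen : s + 1 + L.length ≤ n := by simp at hlen; omega
    rw [hcast, ih (s+1) _ (by simp [ho]) hLlen i hi]
    have hiff : (((d + (s:Int)) % (n:Int)).toNat = i) ↔ r = s := by
      have h1 : (((d + (s:Int)) % (n:Int)).toNat = i) ↔ ((i:Int) = (d + (s:Int)) % (n:Int)) := by omega
      rw [h1, emod_shift (by omega) (by exact_mod_cast hi) (by omega) (by
        have : s < n := by omega
        exact_mod_cast this)]
      omega
    by_cases hcase : s + 1 ≤ r ∧ r < s + 1 + L.length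
    · have h2 : r - s = (r - (s+1)) + 1 := by omega
      rw [if_pos hcase, if_pos (by simp only [List.length_cons]; omega), ← hrdef, h2]
      simp
    · rw [if_neg hcase, List.getElem?_set]
      by_cases hrs : r = s
      · rw [if_pos (hiff.mpr hrs),
          if_pos (show ((d + (s:Int)) % (n:Int)).toNat < o.length by omega),
          if_pos (show s ≤ r ∧ r < s + (l :: L).length by simp only [List.length_cons]; omega),
          hrs, Nat.sub_self]
        simp
      · rw [if_neg (fun h => hrs (hiff.mp h)), if_neg (by simp only [List.length_cons]; omega)]

theorem scatter_length (d nI : Int) :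
    ∀ (ps : List (Int × String)) (o : List String),
      (ps.foldl (fun o p => PySem.List.pySetD o (PySem.Int.mod (d + p.1) nI) p.2) o).length
        = o.length := by
  intro ps
  induction ps with
  | nil => intro o; rfl
  | cons p ps ih => intro o; rw [List.foldl_cons, ih, PySem.List.length_pySetD]

theorem B_eq_map (d n : Int) :
    calculate_positions_alt d n =
      (PySem.List.pyRange 0 n 1).map (fun i => labelFn n (PySem.Int.mod (i - d) n)) := by
  by_cases hn : n ≤ 0
  · unfold calculate_positions_alt
    rw [if_pos hn, PySem.List.pyRange_one_eq_nil hn, List.map_nil]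
  replace hn : 0 < n := by omega
  have hcastn : ((n.toNat : Nat) : Int) = n := by omega
  have hB : calculate_positions_alt d n =
      (PySem.List.enumerate (relLabels n) 0).foldl
        (fun o p => PySem.List.pySetD o (PySem.Int.mod (d + p.1) n) p.2)
        (List.replicate n.toNat "") := by
    unfold calculate_positions_alt
    rw [if_neg (by omega)]
    rw [show PySem.List.pyRepeat [""] n = List.replicate n.toNat "" from PySem.List.pyRepeat_singleton _ _]
    rfl
  rw [hB]
  have hR : PySem.List.pyRange 0 n 1 = (List.range n.toNat).map (fun k : Nat => (k : Int)) := by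
    rw [← hcastn]; exact PySem.List.pyRange_zero_natCast n.toNat
  apply List.ext_getElem?
  intro i
  by_cases hi : i < n.toNat
  · have hscatter := scatter_getElem d n.toNat (by omega) (relLabels n) 0
      (List.replicate n.toNat "") (by simp) (by rw [length_relLabels hn]; omega) i hi
    rw [Nat.cast_zero, hcastn] at hscatter
    rw [hscatter]
    have hr0 : (0:Int) ≤ ((i:Int) - d) % n := Int.emod_nonneg _ (by omega)
    have hrlt : ((i:Int) - d) % n < n := Int.emod_lt_of_pos _ (by omega)
    rw [if_pos (by rw [length_relLabels hn]; omega), Nat.sub_zero]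
    rw [getElem?_relLabels hn _ (by omega)]
    rw [hR]
    simp only [List.getElem?_map, List.getElem?_range hi, Option.map_some]
    rw [PySem.Int.mod_eq_emod_of_pos (by omega)]
    congr 1
    congr 1
    omega
  · rw [List.getElem?_eq_none (by
      rw [scatter_length, List.length_replicate]; omega),
      List.getElem?_eq_none (by rw [hR]; simp; omega)]

-- ===== VERDICT =====
theorem calculate_positions_spec : Claim_equal_calculate_positions := by
  intro d n _
  unfold Spec_calculate_positions
  rw [A_eq_map, B_eq_map]
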